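-- pv_equiv track=rewrite | github.com/w04m1/elte-rag-assistant | app/main.py | _count_source_types
-- ===== SOURCE A (Python) =====
-- def _count_source_types(cited_sources: list[dict]) -> dict[str, int]:
--     counts = {"pdf": 0, "news": 0}
--     for source in cited_sources:
--         source_type = str(source.get("source_type", "pdf")).strip().lower()
--         if source_type == "news":
--             counts["news"] += 1
--         else:
--             counts["pdf"] += 1
--     return counts
-- ===== SOURCE B (Python) =====
-- def _count_source_types(cited_sources: list[dict]) -> dict[str, int]:
--     # Divide-and-conquer: count pdf/news pairs on index halves and merge.
--     def count(lo, hi):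
--         if hi - lo == 0:
--             return (0, 0)
--         if hi - lo == 1:
--             t = str(cited_sources[lo].get("source_type", "pdf")).strip().lower()
--             return (0, 1) if t == "news" else (1, 0)
--         mid = (lo + hi) // 2
--         p1, n1 = count(lo, mid)
--         p2, n2 = count(mid, hi)
--         return (p1 + p2, n1 + n2)
--     pdf, news = count(0, len(cited_sources))
--     return {"pdf": pdf, "news": news}
-- ===== Notes on version B (the rewrite author's own statement) =====
-- stated objective: alternative
-- what changed: B replaces the sequential two-counter loop by a divide-and-conquer recursion over index halves that returns (pdf,news) pairs and merges them by addition; correct because the count is an associative-commutative sum over the elements.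
import Mathlib
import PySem

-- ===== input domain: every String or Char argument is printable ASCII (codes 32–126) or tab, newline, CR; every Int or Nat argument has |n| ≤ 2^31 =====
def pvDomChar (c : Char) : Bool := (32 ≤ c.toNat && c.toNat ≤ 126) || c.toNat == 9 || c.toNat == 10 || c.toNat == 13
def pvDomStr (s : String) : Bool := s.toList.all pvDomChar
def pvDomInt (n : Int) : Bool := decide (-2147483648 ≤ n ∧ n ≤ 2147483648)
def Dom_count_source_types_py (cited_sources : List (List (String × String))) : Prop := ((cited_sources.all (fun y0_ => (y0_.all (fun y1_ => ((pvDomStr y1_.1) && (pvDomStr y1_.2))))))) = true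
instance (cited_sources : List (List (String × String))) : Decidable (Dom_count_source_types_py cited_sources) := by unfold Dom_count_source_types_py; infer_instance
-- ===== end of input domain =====

-- B replaces the sequential two-counter loop by a divide-and-conquer recursion over index halves merging (pdf,news) pairs; alternative decomposition, same value.

-- ===== PORT A =====
-- shared helper: str(source.get("source_type", "pdf")).strip().lower()  (str() is identity on a str value)
def pvSourceType (source : List (String × String)) : String :=
  PySem.Str.lower (PySem.Str.strip ((PySem.Dict.mk source).getD "source_type" "pdf"))

def count_source_types_py (cited_sources : List (List (String × String))) : List (String × Int) :=
  let counts : PySem.Dict String Int := ((PySem.Dict.empty).insert "pdf" 0).insert "news" 0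
  let counts := cited_sources.foldl
    (fun d source =>
      if pvSourceType source == "news" then d.modify "news" 0 (· + 1)
      else d.modify "pdf" 0 (· + 1)) counts
  counts.items

-- ===== PORT B =====
-- count(lo, hi): divide-and-conquer over index halves.  cited_sources[lo] is ported with
-- pyGet?; the .getD [] default is never reached since lo < hi ≤ len within the recursion.
def pvCount (cs : List (List (String × String))) (lo hi : Nat) : Int × Int :=
  if hi - lo = 0 then (0, 0)
  else if hi - lo = 1 then
    if pvSourceType ((PySem.List.pyGet? cs (lo : Int)).getD []) == "news" then (0, 1) else (1, 0)
  else
    let mid := (lo + hi) / 2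
    let p1 := pvCount cs lo mid
    let p2 := pvCount cs mid hi
    (p1.1 + p2.1, p1.2 + p2.2)
termination_by hi - lo
decreasing_by all_goals omega

def count_source_types_py_alt (cited_sources : List (List (String × String))) : List (String × Int) :=
  let r := pvCount cited_sources 0 cited_sources.length
  [("pdf", r.1), ("news", r.2)]

-- ===== PRECONDITION & SPEC =====
def Spec_count_source_types_py (cited_sources : List (List (String × String))) (out : List (String × Int)) : Prop := out = count_source_types_py_alt cited_sources
instance (cited_sources : List (List (String × String))) (out : List (String × Int)) : Decidable (Spec_count_source_types_py cited_sources out) := by unfold Spec_count_source_types_py; infer_instance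

-- ===== CLAIM (what is proved, stated in full; the proofs are below) =====
def Claim_equal_count_source_types_py : Prop := ∀ (cited_sources : List (List (String × String))), Dom_count_source_types_py cited_sources → Spec_count_source_types_py cited_sources (count_source_types_py cited_sources)

-- ===== LEMMAS AND PROOFS =====

-- A's loop over a two-key dict: closed form of the resulting items list
theorem pv_loop_items (cs : List (List (String × String))) (a b : Int) :
    (cs.foldl (fun d source =>
        if pvSourceType source == "news" then d.modify "news" 0 (· + 1)
        else d.modify "pdf" 0 (· + 1))
      (PySem.Dict.mk [("pdf", a), ("news", b)])).items
    = [("pdf", a + (cs.countP (fun s => !(pvSourceType s == "news")) : Int)),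
       ("news", b + (cs.countP (fun s => pvSourceType s == "news") : Int))] := by
  induction cs generalizing a b with
  | nil => simp
  | cons x xs ih =>
    have hn : (PySem.Dict.mk [("pdf", a), ("news", b)]).modify "news" 0 (· + 1)
        = PySem.Dict.mk [("pdf", a), ("news", b + 1)] := by
      simp [PySem.Dict.modify, PySem.Dict.insert, PySem.Dict.getD, PySem.Dict.get?, PySem.Dict.contains]
    have hp : (PySem.Dict.mk [("pdf", a), ("news", b)]).modify "pdf" 0 (· + 1)
        = PySem.Dict.mk [("pdf", a + 1), ("news", b)] := by
      simp [PySem.Dict.modify, PySem.Dict.insert, PySem.Dict.getD, PySem.Dict.get?, PySem.Dict.contains]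
    by_cases hx : (pvSourceType x == "news") = true
    · rw [List.foldl_cons, if_pos hx, hn, ih]
      simp [hx]
      omega
    · rw [List.foldl_cons, if_neg hx, hp, ih]
      simp [hx]
      omega

-- B's recursion computes the two counts over the index window [lo, hi)
theorem pvCount_eq (cs : List (List (String × String))) :
    ∀ (k lo hi : Nat), hi - lo = k → hi ≤ cs.length →
    pvCount cs lo hi
      = ((((cs.drop lo).take (hi - lo)).countP (fun s => !(pvSourceType s == "news")) : Int),
         (((cs.drop lo).take (hi - lo)).countP (fun s => pvSourceType s == "news") : Int)) := by
  intro k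
  induction k using Nat.strong_induction_on with
  | _ k ih =>
    intro lo hi hk hlen
    rw [pvCount]
    by_cases h0 : hi - lo = 0
    · simp [h0]
    · by_cases h1 : hi - lo = 1
      · have hlo : lo < cs.length := by omega
        have hx : PySem.List.pyGet? cs (lo : Int) = some cs[lo] := by
          rw [PySem.List.pyGet?_natCast]; exact List.getElem?_eq_getElem hlo
        have hslice : (cs.drop lo).take 1 = [cs[lo]] := by
          rw [List.take_one, List.head?_drop]
          simp [List.getElem?_eq_getElem hlo]
        simp only [h1, hx, Option.getD_some, hslice]
        by_cases hn : (pvSourceType cs[lo] == "news") = true <;> simp [hn]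
      · simp only [h0, if_false, h1, if_false]
        have h2 : 2 ≤ hi - lo := by omega
        set mid := (lo + hi) / 2 with hmid
        have hm1 : lo < mid := by omega
        have hm2 : mid < hi := by omega
        rw [ih (mid - lo) (by omega) lo mid rfl (by omega),
            ih (hi - mid) (by omega) mid hi rfl hlen]
        have hsplit : (cs.drop lo).take (hi - lo)
            = (cs.drop lo).take (mid - lo) ++ (cs.drop mid).take (hi - mid) := by
          rw [show hi - lo = (mid - lo) + (hi - mid) by omega, List.take_add, List.drop_drop,
              show lo + (mid - lo) = mid from by omega]
        rw [hsplit, List.countP_append, List.countP_append]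
        push_cast
        rw [Prod.mk.injEq]
        constructor <;> ring_nf

-- ===== VERDICT (by name: the statement is the Claim_ definition above) =====
theorem count_source_types_py_spec : Claim_equal_count_source_types_py := by
  intro cs _
  show count_source_types_py cs = count_source_types_py_alt cs
  unfold count_source_types_py count_source_types_py_alt
  have hinit : (((PySem.Dict.empty).insert "pdf" (0:Int)).insert "news" 0)
      = PySem.Dict.mk [("pdf", 0), ("news", 0)] := by
    simp [PySem.Dict.insert, PySem.Dict.empty, PySem.Dict.contains]
  rw [hinit, pv_loop_items,
      pvCount_eq cs (cs.length - 0) 0 cs.length rfl (le_refl _)]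
  simp
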